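-- pv_equiv track=rewrite | github.com/zeroq/cuckoo | modules/processing/createSummary.py | getRegValues
-- ===== SOURCE A (Python) =====
-- def getRegValues(parts):
--     regpath = None
--     registry = None
--     access = None
--     handle = None
--     for item in parts:
--         if item.lower().startswith("registry->"):
--             registry = item.split('->')[1].lower()
--         elif item.lower().startswith("subkey->"):
--             regpath = item.split('->')[1].replace('\\\\', '\\')
--         elif item.lower().startswith("access->"):
--             access = item.split('->')[1]
--         elif item.lower().startswith("handle->"):
--             handle = item.split('->')[1]
--     return regpath, registry, access, handle
-- ===== SOURCE B (Python) =====
-- def getRegValues(parts):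
--     # Generic parse phase: index every "key->value" item by its lowercased key
--     # (last occurrence wins, same as A's overwriting assignments).
--     table = {}
--     for item in parts:
--         if '->' in item:
--             fields = item.split('->')
--             table[fields[0].lower()] = fields[1]
--     # Extraction phase: pull the four fields out of the index.
--     regpath = table['subkey'].replace('\\\\', '\\') if 'subkey' in table else None
--     registry = table['registry'].lower() if 'registry' in table else None
--     access = table.get('access')
--     handle = table.get('handle')
--     return regpath, registry, access, handle
-- ===== Notes on version B (the rewrite author's own statement) =====
-- stated objective: simpler
-- what changed: Replaces A's per-item four-way keyword dispatch (up to four lower()+startswith scans per item) with one generic key->value indexing pass (a dict keyed by the lowercased prefix before '->', last occurrence wins) followed by a separate extraction step for the four fields.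
import Mathlib
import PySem

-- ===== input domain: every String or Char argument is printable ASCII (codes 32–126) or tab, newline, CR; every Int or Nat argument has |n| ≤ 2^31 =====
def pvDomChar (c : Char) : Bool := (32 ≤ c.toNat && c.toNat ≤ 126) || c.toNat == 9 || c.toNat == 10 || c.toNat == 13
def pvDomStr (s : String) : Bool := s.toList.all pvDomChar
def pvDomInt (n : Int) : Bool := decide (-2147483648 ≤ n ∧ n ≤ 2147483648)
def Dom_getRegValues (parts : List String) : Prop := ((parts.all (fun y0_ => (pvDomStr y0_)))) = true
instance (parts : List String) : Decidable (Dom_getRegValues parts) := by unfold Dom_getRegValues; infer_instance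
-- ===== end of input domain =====

-- B replaces A's per-item four-way keyword dispatch with one generic "key->value" indexing pass
-- (a dict keyed by the lowercased prefix before '->', last occurrence wins) plus a separate
-- extraction step; same cost, simpler decomposition.

-- ===== PORT A =====
-- A's loop body: a four-way elif dispatch updating one of the four slots.
-- '->' is a nonempty literal separator, so Str.split? is always `some`; `.getD []` never fires.
def pvAStep (st : Option String × Option String × Option String × Option String) (item : String) :
    Option String × Option String × Option String × Option String :=
  match st with
  | (regpath, registry, access, handle) =>
    if PySem.Str.startswith (PySem.Str.lower item) "registry->" then
      (regpath, some (PySem.Str.lower (PySem.List.pyGetD ((PySem.Str.split? item "->").getD []) 1 "")), access, handle)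
    else if PySem.Str.startswith (PySem.Str.lower item) "subkey->" then
      (some (PySem.Str.replace (PySem.List.pyGetD ((PySem.Str.split? item "->").getD []) 1 "") "\\\\" "\\"), registry, access, handle)
    else if PySem.Str.startswith (PySem.Str.lower item) "access->" then
      (regpath, registry, some (PySem.List.pyGetD ((PySem.Str.split? item "->").getD []) 1 ""), handle)
    else if PySem.Str.startswith (PySem.Str.lower item) "handle->" then
      (regpath, registry, access, some (PySem.List.pyGetD ((PySem.Str.split? item "->").getD []) 1 ""))
    else (regpath, registry, access, handle)

def getRegValues (parts : List String) : Option String × Option String × Option String × Option String :=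
  parts.foldl pvAStep (none, none, none, none)

-- ===== PORT B =====
-- B's loop body: generic indexing of every "key->value" item by its lowercased key (last wins).
def pvBStep (t : PySem.Dict String String) (item : String) : PySem.Dict String String :=
  if PySem.Str.isIn "->" item then
    let fields := (PySem.Str.split? item "->").getD []
    t.insert (PySem.Str.lower (PySem.List.pyGetD fields 0 "")) (PySem.List.pyGetD fields 1 "")
  else t

def getRegValues_alt (parts : List String) : Option String × Option String × Option String × Option String :=
  let table := parts.foldl pvBStep PySem.Dict.empty
  let regpath := (table.get? "subkey").map (fun v => PySem.Str.replace v "\\\\" "\\")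
  let registry := (table.get? "registry").map (fun v => PySem.Str.lower v)
  let access := table.get? "access"
  let handle := table.get? "handle"
  (regpath, registry, access, handle)

-- ===== PRECONDITION & SPEC =====
def Spec_getRegValues (parts : List String) (out : Option String × Option String × Option String × Option String) : Prop := out = getRegValues_alt parts
instance (parts : List String) (out : Option String × Option String × Option String × Option String) : Decidable (Spec_getRegValues parts out) := by unfold Spec_getRegValues; infer_instance

-- ===== CLAIM (what is proved, stated in full; the proofs are below) =====
def Claim_equal_getRegValues : Prop := ∀ (parts : List String), Dom_getRegValues parts → Spec_getRegValues parts (getRegValues parts)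

-- ===== LEMMAS AND PROOFS =====


-- B's final extraction step, applied to an intermediate dict (proof-side helper).
def pvExtract (t : PySem.Dict String String) :
    Option String × Option String × Option String × Option String :=
  ((t.get? "subkey").map (fun v => PySem.Str.replace v "\\\\" "\\"),
   (t.get? "registry").map (fun v => PySem.Str.lower v),
   t.get? "access", t.get? "handle")

-- lowerChar only moves characters INTO 'a'..'z': any other target value is reflected.
theorem pvLowerChar_reflect (c c' : Char) (hc' : c'.toNat < 97 ∨ 122 < c'.toNat)
    (h : PySem.Chars.lowerChar c = c') : c = c' := by
  unfold PySem.Chars.lowerChar PySem.Chars.isupper at h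
  split_ifs at h with hu
  · exfalso
    simp only [Bool.and_eq_true, decide_eq_true_eq] at hu
    obtain ⟨h1, h2⟩ := hu
    rw [Char.le_def, UInt32.le_iff_toNat_le] at h1 h2
    have hA : ('A' : Char).val.toNat = 65 := by decide
    have hZ : ('Z' : Char).val.toNat = 90 := by decide
    have hvalid : (c.toNat + 32).isValidChar := by
      constructor; unfold Char.toNat; omega
    have ht : (Char.ofNat (c.toNat + 32)).toNat = c.toNat + 32 := by
      rw [Char.ofNat, dif_pos hvalid]
      simp only [Char.ofNatAux, Char.toNat]
      rfl
    rw [h] at ht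
    unfold Char.toNat at *
    omega
  · exact h

-- a "->" prefix of the lowercased list reflects to the original list
theorem pvPrefix_reflect (w : List Char) (h : ['-', '>'] <+: PySem.Chars.lower w) :
    ['-', '>'] <+: w := by
  obtain ⟨u, hu⟩ := h
  match w with
  | [] => simp [PySem.Chars.lower] at hu
  | [a] => simp [PySem.Chars.lower] at hu
  | a :: b :: w' =>
    simp only [PySem.Chars.lower, List.map_cons, List.cons_append, List.nil_append,
      List.cons.injEq] at hu
    obtain ⟨ha, hb, -⟩ := hu
    have ha' : a = '-' := pvLowerChar_reflect a '-' (by decide) ha.symm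
    have hb' : b = '>' := pvLowerChar_reflect b '>' (by decide) hb.symm
    subst ha' hb'
    exact ⟨w', rfl⟩

-- unfolding equations for PySem.Chars.splitOn.go at separator "->"
theorem pvGo_nil (fuel : Nat) (acc : List (List Char)) (curc : List Char) :
    PySem.Chars.splitOn.go ['-','>'] (fuel+1) [] curc acc = (curc.reverse :: acc).reverse := rfl

theorem pvGo_pos (fuel : Nat) (c : Char) (l curc : List Char) (acc : List (List Char))
    (h : ['-','>'].isPrefixOf (c :: l) = true) :
    PySem.Chars.splitOn.go ['-','>'] (fuel+1) (c :: l) curc acc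
      = PySem.Chars.splitOn.go ['-','>'] fuel ((c :: l).drop 2) [] (curc.reverse :: acc) := by
  conv_lhs => rw [PySem.Chars.splitOn.go]
  simp [h]

theorem pvGo_neg (fuel : Nat) (c : Char) (l curc : List Char) (acc : List (List Char))
    (h : ['-','>'].isPrefixOf (c :: l) = false) :
    PySem.Chars.splitOn.go ['-','>'] (fuel+1) (c :: l) curc acc
      = PySem.Chars.splitOn.go ['-','>'] fuel l (c :: curc) acc := by
  conv_lhs => rw [PySem.Chars.splitOn.go]
  simp [h]

theorem pvGo_acc (fuel : Nat) : ∀ (l curc : List Char) (acc : List (List Char)),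
    PySem.Chars.splitOn.go ['-','>'] fuel l curc acc
      = acc.reverse ++ PySem.Chars.splitOn.go ['-','>'] fuel l curc [] := by
  induction fuel with
  | zero => intro l curc acc; simp [PySem.Chars.splitOn.go]
  | succ f ih =>
    intro l curc acc
    match l with
    | [] => simp [pvGo_nil]
    | c :: l' =>
      by_cases hp : ['-','>'].isPrefixOf (c :: l') = true
      · rw [pvGo_pos f c l' curc acc hp, pvGo_pos f c l' curc [] hp, ih, ih _ _ [curc.reverse]]
        simp
      · have hp' := Bool.eq_false_iff.mpr hp
        rw [pvGo_neg f c l' curc acc hp', pvGo_neg f c l' curc [] hp', ih]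

theorem pvGo_fuel (fuel : Nat) : ∀ (fuel' : Nat) (l curc : List Char) (acc : List (List Char)),
    l.length < fuel → l.length < fuel' →
    PySem.Chars.splitOn.go ['-','>'] fuel l curc acc
      = PySem.Chars.splitOn.go ['-','>'] fuel' l curc acc := by
  induction fuel with
  | zero => intro fuel' l curc acc h1 h2; omega
  | succ f ih =>
    intro fuel' l curc acc h1 h2
    match fuel', l with
    | 0, l => omega
    | f' + 1, [] => rfl
    | f' + 1, c :: l' =>
      by_cases hp : ['-','>'].isPrefixOf (c :: l') = true
      · rw [pvGo_pos f c l' curc acc hp, pvGo_pos f' c l' curc acc hp]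
        apply ih
        · simp at h1 ⊢; omega
        · simp at h2 ⊢; omega
      · have hp' := Bool.eq_false_iff.mpr hp
        rw [pvGo_neg f c l' curc acc hp', pvGo_neg f' c l' curc acc hp']
        apply ih
        · simp at h1; omega
        · simp at h2; omega

theorem pvGo_skip (q : List Char) : ∀ (l curc : List Char) (acc : List (List Char)) (fuel : Nat),
    (∀ i, i < q.length → ¬ (['-','>'] <+: (q ++ l).drop i)) →
    PySem.Chars.splitOn.go ['-','>'] (fuel + q.length) (q ++ l) curc acc
      = PySem.Chars.splitOn.go ['-','>'] fuel l (q.reverse ++ curc) acc := by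
  induction q with
  | nil => intro l curc acc fuel _; simp
  | cons c q' ih =>
    intro l curc acc fuel h
    have h0 : ¬ (['-','>'] <+: (c :: (q' ++ l))) := by
      have := h 0 (by simp)
      simpa using this
    have hp : ['-','>'].isPrefixOf (c :: (q' ++ l)) = false := by
      rw [Bool.eq_false_iff]
      intro hc
      exact h0 (List.isPrefixOf_iff_prefix.mp hc)
    have hfu : fuel + (c :: q').length = (fuel + q'.length) + 1 := by simp; omega
    rw [hfu]
    simp only [List.cons_append]
    rw [pvGo_neg (fuel + q'.length) c (q' ++ l) curc acc hp]
    rw [ih l (c :: curc) acc fuel (fun i hi => by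
      have := h (i + 1) (by simp; omega)
      simpa using this)]
    simp

theorem pvSplitOn_decomp (q r : List Char)
    (h : ∀ i, i < q.length → ¬ (['-','>'] <+: (q ++ '-' :: '>' :: r).drop i)) :
    PySem.Chars.splitOn (q ++ '-' :: '>' :: r) ['-','>']
      = q :: PySem.Chars.splitOn r ['-','>'] := by
  unfold PySem.Chars.splitOn
  rw [pvGo_fuel _ ((r.length + 2 + 1) + q.length) _ _ _ (by simp) (by simp; omega)]
  rw [pvGo_skip q ('-' :: '>' :: r) [] [] (r.length + 2 + 1) h]
  simp only [List.append_nil]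
  rw [pvGo_pos (r.length + 2) '-' ('>' :: r) q.reverse [] (by simp [List.isPrefixOf])]
  simp only [List.drop_succ_cons, List.drop_zero, List.reverse_reverse]
  rw [pvGo_acc (r.length + 2) r [] [q]]
  rw [pvGo_fuel (r.length + 2) (r.length + 1) r [] [] (by omega) (by omega)]
  rfl

theorem pvKeyEq (q' : List Char) : ∀ (p x u : List Char), '-' ∉ p →
    (∀ i, i < q'.length → ¬ (['-','>'] <+: (q' ++ '-' :: '>' :: x).drop i)) →
    q' ++ '-' :: '>' :: x = p ++ '-' :: '>' :: u → q' = p := by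
  induction q' with
  | nil =>
    intro p x u hp _ heq
    match p with
    | [] => rfl
    | d :: p' =>
      exfalso
      simp only [List.nil_append, List.cons_append, List.cons.injEq] at heq
      exact hp (by simp [heq.1.symm])
  | cons c q'' ih =>
    intro p x u hp h heq
    match p with
    | [] =>
      exfalso
      apply h 0 (by simp)
      simp only [List.drop_zero]
      exact ⟨u, by simpa using heq.symm⟩
    | d :: p' =>
      simp only [List.cons_append, List.cons.injEq] at heq
      obtain ⟨hcd, heq'⟩ := heq
      have hqp : q'' = p' := by
        apply ih p' x u (fun hm => hp (by simp [hm]))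
          (fun i hi => by
            have := h (i + 1) (by simp; omega)
            simpa using this)
          heq'
      simp [hcd, hqp]

-- the elif test for keyword p is exactly "the part before the first '->' lowercases to p"
theorem pvCond_iff (cs q r : List Char) (hdec : cs = q ++ '-' :: '>' :: r)
    (hmin : ∀ i, i < q.length → ¬ (['-','>'] <+: cs.drop i))
    (p : List Char) (hp : '-' ∉ p) :
    (PySem.Chars.startswith (PySem.Chars.lower cs) (p ++ ['-','>']) = true)
      ↔ PySem.Chars.lower q = p := by
  have hlow : PySem.Chars.lower cs
      = PySem.Chars.lower q ++ '-' :: '>' :: PySem.Chars.lower r := by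
    rw [hdec]
    simp [PySem.Chars.lower, PySem.Chars.lowerChar, PySem.Chars.isupper]
  constructor
  · intro h
    obtain ⟨u, hu⟩ := (PySem.Chars.startswith_iff _ _).mp h
    apply pvKeyEq (PySem.Chars.lower q) p (PySem.Chars.lower r) u hp
    · intro i hi hpre
      have hi' : i < q.length := by simpa [PySem.Chars.lower] using hi
      apply hmin i hi'
      apply pvPrefix_reflect
      rw [← hlow] at hpre
      simpa [PySem.Chars.lower, List.map_drop] using hpre
    · rw [← hlow, ← hu]; simp
  · intro h
    rw [PySem.Chars.startswith_iff, hlow, h]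
    exact ⟨PySem.Chars.lower r, by simp⟩

-- every elif test forces '->' to occur in the item
theorem pvCond_isIn (cs p : List Char)
    (h : PySem.Chars.startswith (PySem.Chars.lower cs) (p ++ ['-','>']) = true) :
    PySem.Chars.isIn ['-','>'] cs = true := by
  obtain ⟨u, hu⟩ := (PySem.Chars.startswith_iff _ _).mp h
  apply (PySem.Chars.exists_prefix_drop_iff_isIn ['-','>'] cs).mp
  refine ⟨p.length, ?_⟩
  apply pvPrefix_reflect
  have h2 : ['-','>'] <+: (PySem.Chars.lower cs).drop p.length := by
    rw [← hu]
    simp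
  simpa [PySem.Chars.lower, List.map_drop] using h2


theorem pvStep (t : PySem.Dict String String) (item : String) :
    pvAStep (pvExtract t) item = pvExtract (pvBStep t item) := by
  have hsepT : ("->" : String).toList = ['-','>'] := by decide
  have hrT : ("registry->" : String).toList = "registry".toList ++ ['-','>'] := by decide
  have hsT : ("subkey->" : String).toList = "subkey".toList ++ ['-','>'] := by decide
  have haT : ("access->" : String).toList = "access".toList ++ ['-','>'] := by decide
  have hhT : ("handle->" : String).toList = "handle".toList ++ ['-','>'] := by decide
  cases hin : PySem.Str.isIn "->" item with
  | false =>
    have hinC : PySem.Chars.isIn ['-','>'] item.toList = false := by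
      have he := PySem.Str.isIn_eq "->" item
      rw [hin, hsepT] at he
      exact he.symm
    have hBF : pvBStep t item = t := by
      unfold pvBStep
      rw [if_neg (fun hc => Bool.false_ne_true (hin.symm.trans hc))]
    rw [hBF]
    have hcf : ∀ (kw : String) (p : List Char), kw.toList = p ++ ['-','>'] →
        PySem.Str.startswith (PySem.Str.lower item) kw = false := by
      intro kw p hkw
      rw [Bool.eq_false_iff]
      intro hc
      rw [PySem.Str.startswith_eq, PySem.Str.toList_lower, hkw] at hc
      exact Bool.false_ne_true (hinC.symm.trans (pvCond_isIn item.toList p hc))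
    simp only [pvAStep, pvExtract]
    rw [if_neg (fun hc => Bool.false_ne_true ((hcf _ _ hrT).symm.trans hc)),
      if_neg (fun hc => Bool.false_ne_true ((hcf _ _ hsT).symm.trans hc)),
      if_neg (fun hc => Bool.false_ne_true ((hcf _ _ haT).symm.trans hc)),
      if_neg (fun hc => Bool.false_ne_true ((hcf _ _ hhT).symm.trans hc))]
  | true =>
    have hinC : PySem.Chars.isIn ['-','>'] item.toList = true := by
      have he := PySem.Str.isIn_eq "->" item
      rw [hin, hsepT] at he
      exact he.symm
    have hinf := (PySem.Chars.isIn_iff_infix _ _).mp hinC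
    have hnn := (PySem.Chars.find_nonneg_iff item.toList ['-','>']).mpr hinf
    obtain ⟨hpre, hmin⟩ := PySem.Chars.find_spec hnn
    obtain ⟨u, hu⟩ := hpre
    have hjlen : (PySem.Chars.find item.toList ['-','>']).toNat < item.toList.length := by
      by_contra hle
      rw [not_lt] at hle
      rw [List.drop_eq_nil_of_le hle] at hu
      simp at hu
    have hdec : item.toList = item.toList.take (PySem.Chars.find item.toList ['-','>']).toNat
        ++ '-' :: '>' :: u := by
      conv_lhs => rw [← List.take_append_drop (PySem.Chars.find item.toList ['-','>']).toNat item.toList, ← hu]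
      rfl
    set j := (PySem.Chars.find item.toList ['-','>']).toNat with hjdef
    set q := item.toList.take j with hqdef
    have hqlen : q.length = j := by
      rw [hqdef, List.length_take]
      omega
    have hminq : ∀ i, i < q.length → ¬ (['-','>'] <+: item.toList.drop i) := by
      intro i hi
      exact hmin i (by omega)
    have hminq' : ∀ i, i < q.length → ¬ (['-','>'] <+: (q ++ '-' :: '>' :: u).drop i) := by
      intro i hi
      rw [← hdec]
      exact hminq i hi
    have hsplit : PySem.Chars.splitOn item.toList ['-','>']
        = q :: PySem.Chars.splitOn u ['-','>'] := by
      conv_lhs => rw [hdec]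
      exact pvSplitOn_decomp q u hminq'
    have hfields : (PySem.Str.split? item "->").getD []
        = String.ofList q :: (PySem.Chars.splitOn u ['-','>']).map String.ofList := by
      unfold PySem.Str.split? PySem.Chars.split?
      rw [hsepT, if_neg (by simp), hsplit]
      rfl
    have hf0 : PySem.List.pyGetD ((PySem.Str.split? item "->").getD []) 0 "" = String.ofList q := by
      rw [hfields]
      simp [PySem.List.pyGetD_ofNat']
    have hciff : ∀ p : List Char, '-' ∉ p →
        ((PySem.Chars.startswith (PySem.Chars.lower item.toList) (p ++ ['-','>']) = true)
          ↔ PySem.Chars.lower q = p) :=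
      fun p hp => pvCond_iff item.toList q u hdec hminq p hp
    have hkeyT : (PySem.Str.lower (String.ofList q)).toList = PySem.Chars.lower q := by
      rw [PySem.Str.toList_lower, String.toList_ofList]
    have hcstr : ∀ (kw : String) (p : List Char), kw.toList = p ++ ['-','>'] → '-' ∉ p →
        (PySem.Str.startswith (PySem.Str.lower item) kw = true ↔ PySem.Chars.lower q = p) := by
      intro kw p hkw hp
      rw [PySem.Str.startswith_eq, PySem.Str.toList_lower, hkw]
      exact hciff p hp
    have hBT : pvBStep t item
        = t.insert (PySem.Str.lower (String.ofList q))
            (PySem.List.pyGetD ((PySem.Str.split? item "->").getD []) 1 "") := by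
      unfold pvBStep
      rw [if_pos hin]
      simp only [hf0]
    by_cases hr : PySem.Chars.lower q = "registry".toList
    · have hkey : PySem.Str.lower (String.ofList q) = "registry" :=
        String.toList_inj.mp (by rw [hkeyT, hr])
      rw [hBT, hkey]
      simp only [pvAStep, pvExtract]
      rw [if_pos ((hcstr _ _ hrT (by decide)).mpr hr)]
      rw [PySem.Dict.get?_insert_self t]
      rw [PySem.Dict.get?_insert_of_ne t _ (by decide : ("subkey" : String) ≠ "registry"),
        PySem.Dict.get?_insert_of_ne t _ (by decide : ("access" : String) ≠ "registry"),
        PySem.Dict.get?_insert_of_ne t _ (by decide : ("handle" : String) ≠ "registry")]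
      rfl
    · have hc1 : PySem.Str.startswith (PySem.Str.lower item) "registry->" = false :=
        Bool.eq_false_iff.mpr (fun hc => hr ((hcstr _ _ hrT (by decide)).mp hc))
      by_cases hs : PySem.Chars.lower q = "subkey".toList
      · have hkey : PySem.Str.lower (String.ofList q) = "subkey" :=
          String.toList_inj.mp (by rw [hkeyT, hs])
        rw [hBT, hkey]
        simp only [pvAStep, pvExtract]
        rw [if_neg (fun hcx => Bool.false_ne_true (hc1.symm.trans hcx)), if_pos ((hcstr _ _ hsT (by decide)).mpr hs)]
        rw [PySem.Dict.get?_insert_self t]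
        rw [PySem.Dict.get?_insert_of_ne t _ (by decide : ("registry" : String) ≠ "subkey"),
          PySem.Dict.get?_insert_of_ne t _ (by decide : ("access" : String) ≠ "subkey"),
          PySem.Dict.get?_insert_of_ne t _ (by decide : ("handle" : String) ≠ "subkey")]
        rfl
      · have hc2 : PySem.Str.startswith (PySem.Str.lower item) "subkey->" = false :=
          Bool.eq_false_iff.mpr (fun hc => hs ((hcstr _ _ hsT (by decide)).mp hc))
        by_cases ha : PySem.Chars.lower q = "access".toList
        · have hkey : PySem.Str.lower (String.ofList q) = "access" :=
            String.toList_inj.mp (by rw [hkeyT, ha])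
          rw [hBT, hkey]
          simp only [pvAStep, pvExtract]
          rw [if_neg (fun hcx => Bool.false_ne_true (hc1.symm.trans hcx)), if_neg (fun hcx => Bool.false_ne_true (hc2.symm.trans hcx)),
            if_pos ((hcstr _ _ haT (by decide)).mpr ha)]
          rw [PySem.Dict.get?_insert_self t]
          rw [PySem.Dict.get?_insert_of_ne t _ (by decide : ("registry" : String) ≠ "access"),
            PySem.Dict.get?_insert_of_ne t _ (by decide : ("subkey" : String) ≠ "access"),
            PySem.Dict.get?_insert_of_ne t _ (by decide : ("handle" : String) ≠ "access")]
        · have hc3 : PySem.Str.startswith (PySem.Str.lower item) "access->" = false :=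
            Bool.eq_false_iff.mpr (fun hc => ha ((hcstr _ _ haT (by decide)).mp hc))
          by_cases hh : PySem.Chars.lower q = "handle".toList
          · have hkey : PySem.Str.lower (String.ofList q) = "handle" :=
              String.toList_inj.mp (by rw [hkeyT, hh])
            rw [hBT, hkey]
            simp only [pvAStep, pvExtract]
            rw [if_neg (fun hcx => Bool.false_ne_true (hc1.symm.trans hcx)), if_neg (fun hcx => Bool.false_ne_true (hc2.symm.trans hcx)), if_neg (fun hcx => Bool.false_ne_true (hc3.symm.trans hcx)),
              if_pos ((hcstr _ _ hhT (by decide)).mpr hh)]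
            rw [PySem.Dict.get?_insert_self t]
            rw [PySem.Dict.get?_insert_of_ne t _ (by decide : ("registry" : String) ≠ "handle"),
              PySem.Dict.get?_insert_of_ne t _ (by decide : ("subkey" : String) ≠ "handle"),
              PySem.Dict.get?_insert_of_ne t _ (by decide : ("access" : String) ≠ "handle")]
          · have hc4 : PySem.Str.startswith (PySem.Str.lower item) "handle->" = false :=
              Bool.eq_false_iff.mpr (fun hc => hh ((hcstr _ _ hhT (by decide)).mp hc))
            have hK : ∀ kw : String, kw.toList ≠ PySem.Chars.lower q →
                kw ≠ PySem.Str.lower (String.ofList q) := by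
              intro kw hne he
              exact hne (by rw [he, hkeyT])
            rw [hBT]
            simp only [pvAStep, pvExtract]
            rw [if_neg (fun hcx => Bool.false_ne_true (hc1.symm.trans hcx)), if_neg (fun hcx => Bool.false_ne_true (hc2.symm.trans hcx)), if_neg (fun hcx => Bool.false_ne_true (hc3.symm.trans hcx)),
              if_neg (fun hcx => Bool.false_ne_true (hc4.symm.trans hcx))]
            rw [PySem.Dict.get?_insert_of_ne t _ (hK "subkey" (fun he => hs he.symm)),
              PySem.Dict.get?_insert_of_ne t _ (hK "registry" (fun he => hr he.symm)),
              PySem.Dict.get?_insert_of_ne t _ (hK "access" (fun he => ha he.symm)),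
              PySem.Dict.get?_insert_of_ne t _ (hK "handle" (fun he => hh he.symm))]

theorem pvFold (parts : List String) : ∀ (t : PySem.Dict String String),
    parts.foldl pvAStep (pvExtract t) = pvExtract (parts.foldl pvBStep t) := by
  induction parts with
  | nil => intro t; rfl
  | cons x xs ih => intro t; rw [List.foldl_cons, List.foldl_cons, pvStep, ih]

-- ===== VERDICT (by name: the statement is the Claim_ definition above) =====
theorem getRegValues_spec : Claim_equal_getRegValues := by
  intro parts _
  unfold Spec_getRegValues getRegValues getRegValues_alt
  have h0 : (none, none, none, none) = pvExtract PySem.Dict.empty := rfl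
  rw [h0, pvFold]
  rfl
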